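-- pv_equiv track=rewrite | github.com/charansai1432/Python-DSA | sliding window/prefix sum/practise prefix sum/no_of_subarrays_sum_divisible_by_k.py | no_of_subarrays_sum_divisible_by_k
-- ===== SOURCE A (Python) =====
-- def no_of_subarrays_sum_divisible_by_k(arr,k):
--     count = 0
--     n = len(arr)
--     cur_sum = 0
--     freq = {0:1}
--     for i in range(n):
--
--         cur_sum += arr[i]
--         rem = cur_sum % k
--
--         if rem < 0:
--             rem += k
--
--         if rem in freq:
--             count += freq[rem]
--
--         freq[rem] = freq.get(rem,0)+1
--     return count
-- ===== SOURCE B (Python) =====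
-- def no_of_subarrays_sum_divisible_by_k(arr, k):
--     # Sort the normalized prefix-sum remainders, then count equal pairs by scanning runs.
--     rems = [0]
--     p = 0
--     for x in arr:
--         p += x
--         r = p % k
--         if r < 0:
--             r += k
--         rems.append(r)
--     rems.sort()
--     total = 0
--     run = 0
--     prev = None
--     for r in rems:
--         if prev is not None and r == prev:
--             run += 1
--             total += run
--         else:
--             run = 0
--         prev = r
--     return total
-- ===== Notes on version B (the rewrite author's own statement) =====
-- stated objective: alternative
-- what changed: B replaces A's hash-map of prefix-remainder frequencies with a sort-based method: it collects all normalized prefix-sum remainders (seeded with 0 for the empty prefix), sorts them, and counts equal pairs by scanning runs of equal adjacent values; it trades the O(n) dict for an O(n log n) sort with no hashing.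
import Mathlib
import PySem

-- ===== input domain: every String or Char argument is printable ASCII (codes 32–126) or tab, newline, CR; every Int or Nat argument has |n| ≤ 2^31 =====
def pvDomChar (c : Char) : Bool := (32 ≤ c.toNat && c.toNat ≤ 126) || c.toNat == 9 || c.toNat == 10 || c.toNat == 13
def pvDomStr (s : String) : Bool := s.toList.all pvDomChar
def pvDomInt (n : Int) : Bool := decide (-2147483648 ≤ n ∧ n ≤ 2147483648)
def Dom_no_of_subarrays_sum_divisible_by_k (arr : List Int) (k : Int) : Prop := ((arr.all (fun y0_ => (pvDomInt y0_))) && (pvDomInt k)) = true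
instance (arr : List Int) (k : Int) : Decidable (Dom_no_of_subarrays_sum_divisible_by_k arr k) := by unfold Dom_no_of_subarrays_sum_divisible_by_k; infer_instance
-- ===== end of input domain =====

-- B counts subarrays with sum divisible by k by sorting the normalized prefix-sum
-- remainders and scanning runs of equal values, instead of A's hash-map frequency count.


-- ===== PORT A =====
def no_of_subarrays_sum_divisible_by_k (arr : List Int) (k : Int) : Int :=
  (arr.foldl
    (fun (st : Int × Int × PySem.Dict Int Int) x =>
      let cur_sum := st.2.1 + x
      let rem0 := PySem.Int.mod cur_sum k
      let rem := if rem0 < 0 then rem0 + k else rem0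
      let count := if st.2.2.contains rem then st.1 + st.2.2.getD rem 0 else st.1
      (count, cur_sum, st.2.2.insert rem (st.2.2.getD rem 0 + 1)))
    (0, 0, PySem.Dict.empty.insert 0 1)).1

-- ===== PORT B =====
def no_of_subarrays_sum_divisible_by_k_alt (arr : List Int) (k : Int) : Int :=
  let st := arr.foldl
    (fun (st : List Int × Int) x =>
      let p := st.2 + x
      let r0 := PySem.Int.mod p k
      let r := if r0 < 0 then r0 + k else r0
      (st.1 ++ [r], p))
    ([0], 0)
  let rems := PySem.List.sorted st.1 (fun x => x) false
  (rems.foldl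
    (fun (st : Int × Int × Option Int) r =>
      if st.2.2 = some r then (st.1 + st.2.1 + 1, st.2.1 + 1, some r)
      else (st.1, 0, some r))
    (0, 0, none)).1

-- ===== PRECONDITION & SPEC =====
-- Pre_: Python A raises ZeroDivisionError when k = 0 and the list is nonempty; it returns on everything else.
def Pre_no_of_subarrays_sum_divisible_by_k (arr : List Int) (k : Int) : Prop := arr = [] ∨ k ≠ 0
instance (arr : List Int) (k : Int) : Decidable (Pre_no_of_subarrays_sum_divisible_by_k arr k) := by unfold Pre_no_of_subarrays_sum_divisible_by_k; infer_instance
def pvWitness_no_of_subarrays_sum_divisible_by_k : List Int × Int := ([1, 2, 3, -4], 3)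
def Spec_no_of_subarrays_sum_divisible_by_k (arr : List Int) (k : Int) (out : Int) : Prop := out = no_of_subarrays_sum_divisible_by_k_alt arr k
instance (arr : List Int) (k : Int) (out : Int) : Decidable (Spec_no_of_subarrays_sum_divisible_by_k arr k out) := by unfold Spec_no_of_subarrays_sum_divisible_by_k; infer_instance

-- ===== CLAIM (what is proved, stated in full; the proofs are below) =====
def Claim_equal_no_of_subarrays_sum_divisible_by_k : Prop := ∀ (arr : List Int) (k : Int), Dom_no_of_subarrays_sum_divisible_by_k arr k → Pre_no_of_subarrays_sum_divisible_by_k arr k → Spec_no_of_subarrays_sum_divisible_by_k arr k (no_of_subarrays_sum_divisible_by_k arr k)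

-- ===== LEMMAS AND PROOFS =====

/-- Normalized remainder both programs compute. -/
def pvNorm (k p : Int) : Int :=
  let r := PySem.Int.mod p k
  if r < 0 then r + k else r

/-- The list of normalized remainders of the nonempty prefix sums, starting from sum p. -/
def pvRems (k : Int) : Int → List Int → List Int
  | _, [] => []
  | p, x :: xs => pvNorm k (p + x) :: pvRems k (p + x) xs

/-- A's accumulated count: for each new remainder, how often it was seen before. -/
def pvPC (seen : List Int) : List Int → Int
  | [] => 0
  | r :: rs => (seen.count r : Int) + pvPC (seen ++ [r]) rs

/-- A's loop body, named (definitionally equal to the lambda in the port). -/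
def pvAstep (k : Int) (st : Int × Int × PySem.Dict Int Int) (x : Int) : Int × Int × PySem.Dict Int Int :=
  (if st.2.2.contains (pvNorm k (st.2.1 + x)) then st.1 + st.2.2.getD (pvNorm k (st.2.1 + x)) 0 else st.1,
   st.2.1 + x,
   st.2.2.insert (pvNorm k (st.2.1 + x)) (st.2.2.getD (pvNorm k (st.2.1 + x)) 0 + 1))

/-- B's rems-building loop body, named. -/
def pvBbuild (k : Int) (st : List Int × Int) (x : Int) : List Int × Int :=
  (st.1 ++ [pvNorm k (st.2 + x)], st.2 + x)

/-- B's scan loop body, named. -/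
def pvBscan (st : Int × Int × Option Int) (r : Int) : Int × Int × Option Int :=
  if st.2.2 = some r then (st.1 + st.2.1 + 1, st.2.1 + 1, some r) else (st.1, 0, some r)

theorem counter_insert_step (seen : List Int) (r : Int) :
    (PySem.Dict.counter seen).insert r ((PySem.Dict.counter seen).getD r 0 + 1)
      = PySem.Dict.counter (seen ++ [r]) := by
  rw [← PySem.Dict.foldl_insert_getD_add_one_eq_counter, ← PySem.Dict.foldl_insert_getD_add_one_eq_counter,
    List.foldl_append, List.foldl_cons, List.foldl_nil]

theorem pvAstep_counter (k p c x : Int) (seen : List Int) :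
    pvAstep k (c, p, PySem.Dict.counter seen) x
      = (c + (seen.count (pvNorm k (p + x)) : Int), p + x,
         PySem.Dict.counter (seen ++ [pvNorm k (p + x)])) := by
  unfold pvAstep
  rw [counter_insert_step]
  by_cases h : pvNorm k (p + x) ∈ seen
  · simp [PySem.Dict.contains_counter, h, PySem.Dict.getD_counter]
  · simp [PySem.Dict.contains_counter, h, List.count_eq_zero.mpr h]

theorem pvA_fold (k : Int) (xs : List Int) : ∀ (p c : Int) (seen : List Int),
    (xs.foldl (pvAstep k) (c, p, PySem.Dict.counter seen)).1 = c + pvPC seen (pvRems k p xs) := by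
  induction xs with
  | nil => intro p c seen; simp [pvRems, pvPC]
  | cons x xs ih =>
    intro p c seen
    rw [List.foldl_cons, pvAstep_counter, ih (p + x) _ (seen ++ [pvNorm k (p + x)]), pvRems, pvPC]
    ring

theorem pvBbuild_fold (k : Int) (xs : List Int) : ∀ (p : Int) (acc : List Int),
    (xs.foldl (pvBbuild k) (acc, p)).1 = acc ++ pvRems k p xs := by
  induction xs with
  | nil => intro p acc; simp [pvRems]
  | cons x xs ih =>
    intro p acc
    rw [List.foldl_cons, pvBbuild, ih (p + x) _, pvRems]
    simp

/-- pvPC depends on `seen` only through element counts. -/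
theorem pvPC_seen_perm (l : List Int) : ∀ (s s' : List Int), s.Perm s' → pvPC s l = pvPC s' l := by
  induction l with
  | nil => intro s s' _; rfl
  | cons r rs ih =>
    intro s s' h
    rw [pvPC, pvPC, h.count_eq, ih (s ++ [r]) (s' ++ [r]) (h.append_right [r])]

/-- pvPC is invariant under permutation of the scanned list. -/
theorem pvPC_perm {l l' : List Int} (h : l.Perm l') : ∀ (seen : List Int), pvPC seen l = pvPC seen l' := by
  induction h with
  | nil => intro seen; rfl
  | cons x _ ih => intro seen; rw [pvPC, pvPC, ih]
  | swap a b t =>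
    intro seen
    rw [pvPC, pvPC, pvPC, pvPC]
    rw [pvPC_seen_perm t (seen ++ [b] ++ [a]) (seen ++ [a] ++ [b])
      (by simp [List.append_assoc]; exact (List.perm_append_left_iff seen).mpr (List.Perm.swap' _ _ List.Perm.nil))]
    have hsym : ((List.count a [b] : Nat) : Int) = ((List.count b [a] : Nat) : Int) := by
      by_cases hab : a = b
      · subst hab; rfl
      · simp [hab, Ne.symm hab]
    simp [List.count_append]
    rw [hsym]
    ring
  | trans _ _ ih1 ih2 => intro seen; rw [ih1, ih2]

/-- Dropping from `seen` a prefix containing no element of the scanned list. -/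
theorem pvPC_drop (l : List Int) : ∀ (a seen : List Int), (∀ x ∈ l, x ∉ a) →
    pvPC (a ++ seen) l = pvPC seen l := by
  induction l with
  | nil => intro a seen _; rfl
  | cons r rs ih =>
    intro a seen h
    rw [pvPC, pvPC, List.count_append,
      List.count_eq_zero.mpr (h r (List.mem_cons_self)), List.append_assoc]
    rw [ih a (seen ++ [r]) (fun x hx => h x (List.mem_cons_of_mem _ hx))]
    simp

/-- Scan invariant on a sorted tail: prev = p seen (m+1) times so far. -/
theorem pvBscan_fold (l : List Int) : ∀ (m : Nat) (total p : Int),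
    (∀ x ∈ l, p ≤ x) → l.Pairwise (· ≤ ·) →
    (l.foldl pvBscan (total, (m : Int), some p)).1 = total + pvPC (List.replicate (m + 1) p) l := by
  induction l with
  | nil => intro m total p _ _; simp [pvPC]
  | cons r rs ih =>
    intro m total p hle hpw
    have hpr : p ≤ r := hle r (List.mem_cons_self)
    have hpw' := (List.pairwise_cons.mp hpw).2
    have hrle := (List.pairwise_cons.mp hpw).1
    by_cases h : p = r
    · subst h
      rw [List.foldl_cons]
      have hstep : pvBscan (total, (m : Int), some p) p
          = (total + m + 1, ((m + 1 : Nat) : Int), some p) := by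
        simp [pvBscan]
      rw [hstep, ih (m + 1) _ p hrle hpw', pvPC]
      have hrep : List.replicate (m + 1) p ++ [p] = List.replicate (m + 1 + 1) p := by
        rw [← List.replicate_succ']
      rw [hrep]
      simp
      ring
    · rw [List.foldl_cons]
      have hstep : pvBscan (total, (m : Int), some p) r = (total, ((0 : Nat) : Int), some r) := by
        unfold pvBscan
        have : ¬ (some p = some r) := by
          intro he; exact h (Option.some.inj he)
        simp [this]
      rw [hstep, ih 0 total r hrle hpw', pvPC]
      have hcount : (List.replicate (m + 1) p).count r = 0 := by
        simp [List.count_replicate]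
        intro he; exact h he
      have hdrop : pvPC (List.replicate (m + 1) p ++ [r]) rs = pvPC [r] rs := by
        apply pvPC_drop rs (List.replicate (m + 1) p) [r]
        intro x hx hmem
        have hx' : x = p := List.eq_of_mem_replicate hmem
        have hrx : r ≤ x := hrle x hx
        exact h (le_antisymm hpr (hx' ▸ hrx))
      rw [hcount, hdrop]
      simp

/-- The whole scan over a sorted list counts equal pairs. -/
theorem pvBscan_init (l : List Int) (hpw : l.Pairwise (· ≤ ·)) :
    (l.foldl pvBscan (0, 0, none)).1 = pvPC [] l := by
  cases l with
  | nil => rfl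
  | cons r rs =>
    rw [List.foldl_cons]
    have hstep : pvBscan (0, 0, none) r = ((0 : Int), ((0 : Nat) : Int), some r) := by
      simp [pvBscan]
    rw [hstep, pvBscan_fold rs 0 0 r (List.pairwise_cons.mp hpw).1 (List.pairwise_cons.mp hpw).2,
      pvPC]
    simp

-- ===== VERDICT (by name: the statement is the Claim_ definition above) =====
theorem no_of_subarrays_sum_divisible_by_k_spec : Claim_equal_no_of_subarrays_sum_divisible_by_k := by
  intro arr k _ _
  unfold Spec_no_of_subarrays_sum_divisible_by_k
  have h0 : PySem.Dict.empty.insert 0 1 = PySem.Dict.counter ([0] : List Int) := by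
    rw [← PySem.Dict.foldl_insert_getD_add_one_eq_counter]; rfl
  have hA : no_of_subarrays_sum_divisible_by_k arr k
      = (arr.foldl (pvAstep k) (0, 0, PySem.Dict.empty.insert 0 1)).1 := rfl
  have hB : no_of_subarrays_sum_divisible_by_k_alt arr k
      = ((PySem.List.sorted (arr.foldl (pvBbuild k) ([0], 0)).1 (fun x => x) false).foldl
          pvBscan (0, 0, none)).1 := rfl
  set rems := ([0] ++ pvRems k 0 arr : List Int) with hrems
  have hbuild : (arr.foldl (pvBbuild k) ([0], 0)).1 = rems := pvBbuild_fold k arr 0 [0]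
  have hsorted := PySem.List.sorted_pairwise (xs := rems) (key := fun x => x)
  have hperm : (PySem.List.sorted rems (fun x => x) false).Perm rems :=
    PySem.List.sorted_perm rems (fun x => x) false
  rw [hA, hB, h0, hbuild, pvA_fold k arr 0 0 [0],
    pvBscan_init _ hsorted, pvPC_perm hperm []]
  show (0 : Int) + pvPC [0] (pvRems k 0 arr) = pvPC [] ([0] ++ pvRems k 0 arr)
  simp [pvPC]
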